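-- pv_equiv track=rewrite | github.com/hasanseam/CookingFuture | cleanup.py | AssignTaskListToAssistant
-- ===== SOURCE A (Python) =====
-- def isOddNumber(value):
--     return False if value%2==0 else True
--
-- def AssignTaskListToAssistant(CheckedTaskList):
--     AssistantIndexFlag = 1
--     for i in range(len(CheckedTaskList)):
--         if(CheckedTaskList[i]<1):
--             continue
--         else:
--             if(isOddNumber(AssistantIndexFlag)):
--                 CheckedTaskList[i]=-1
--             AssistantIndexFlag +=1
--
--     return CheckedTaskList
-- ===== SOURCE B (Python) =====
-- def AssignTaskListToAssistant(CheckedTaskList):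
--     idxs = [i for i, v in enumerate(CheckedTaskList) if v >= 1]
--     for i in idxs[::2]:
--         CheckedTaskList[i] = -1
--     return CheckedTaskList
-- ===== Notes on version B (the rewrite author's own statement) =====
-- stated objective: simpler
-- what changed: Replaces the running parity-flag counter inside one index loop with a two-pass decomposition: first collect the indices of all qualifying (>= 1) elements, then mark every other one via the strided slice idxs[::2].
import Mathlib
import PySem

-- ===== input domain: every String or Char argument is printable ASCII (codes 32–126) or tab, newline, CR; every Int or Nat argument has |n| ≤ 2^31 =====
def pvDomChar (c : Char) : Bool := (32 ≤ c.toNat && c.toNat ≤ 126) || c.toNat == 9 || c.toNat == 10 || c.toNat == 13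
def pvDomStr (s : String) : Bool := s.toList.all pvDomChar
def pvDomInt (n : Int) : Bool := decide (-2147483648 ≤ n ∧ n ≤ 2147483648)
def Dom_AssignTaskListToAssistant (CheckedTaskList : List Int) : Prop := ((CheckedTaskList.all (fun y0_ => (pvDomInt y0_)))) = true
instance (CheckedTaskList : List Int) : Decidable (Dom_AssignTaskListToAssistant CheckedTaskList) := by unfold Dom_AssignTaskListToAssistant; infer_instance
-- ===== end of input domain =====

-- B replaces A's single-pass parity-flag loop by a two-pass decomposition (collect qualifying
-- indices, then mark the strided slice idxs[::2]); same cost, return value proved equal.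
-- Both A and B mutate the argument list in place in Python; the equivalence here is about the
-- returned value (which is that same list).


-- ===== PORT A =====
-- helper isOddNumber, verbatim
def isOddNumber (value : Int) : Bool :=
  if PySem.Int.mod value 2 == 0 then false else true

-- A's index loop with the in-place updates, as the obvious structural recursion over the
-- same state: the remaining list and the running AssistantIndexFlag.
def assignLoopA : List Int → Int → List Int
  | [], _ => []
  | v :: rest, flag =>
    if v < 1 then v :: assignLoopA rest flag
    else if isOddNumber flag then (-1) :: assignLoopA rest (flag + 1)
    else v :: assignLoopA rest (flag + 1)

def AssignTaskListToAssistant (CheckedTaskList : List Int) : List Int :=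
  assignLoopA CheckedTaskList 1

-- ===== PORT B =====
def AssignTaskListToAssistant_alt (CheckedTaskList : List Int) : List Int :=
  let idxs := ((PySem.List.enumerate CheckedTaskList 0).filter (fun p => 1 ≤ p.2)).map (fun p => p.1)
  let sel := (PySem.List.slice? idxs none none 2).getD []   -- idxs[::2]; step 2 ≠ 0 so never none
  sel.foldl (fun acc i => PySem.List.pySetD acc i (-1)) CheckedTaskList

-- ===== PRECONDITION & SPEC =====
def Spec_AssignTaskListToAssistant (CheckedTaskList : List Int) (out : List Int) : Prop := out = AssignTaskListToAssistant_alt CheckedTaskList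
instance (CheckedTaskList : List Int) (out : List Int) : Decidable (Spec_AssignTaskListToAssistant CheckedTaskList out) := by unfold Spec_AssignTaskListToAssistant; infer_instance

-- ===== CLAIM (what is proved, stated in full; the proofs are below) =====
def Claim_equal_AssignTaskListToAssistant : Prop := ∀ (CheckedTaskList : List Int), Dom_AssignTaskListToAssistant CheckedTaskList → Spec_AssignTaskListToAssistant CheckedTaskList (AssignTaskListToAssistant CheckedTaskList)

-- ===== LEMMAS AND PROOFS =====

-- even-position / odd-position selections of a list (idxs[::2] and idxs[1::2])
mutual
def evSel : List Int → List Int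
  | [] => []
  | a :: t => a :: odSel t
def odSel : List Int → List Int
  | [] => []
  | _ :: t => evSel t
end

theorem evSel_map_add_one : ∀ (l : List Int),
    evSel (l.map (· + 1)) = (evSel l).map (· + 1) ∧
    odSel (l.map (· + 1)) = (odSel l).map (· + 1) := by
  intro l
  induction l with
  | nil => simp [evSel, odSel]
  | cons a t ih => simp [evSel, odSel, ih.1, ih.2]

-- idxs[::2] characterised structurally
theorem filterMap_even : ∀ (xs : List Int),
    (List.filterMap (fun k => xs[2 * k]?) (List.range ((xs.length + 1) / 2)) = evSel xs) ∧
    (List.filterMap (fun k => xs[2 * k + 1]?) (List.range (xs.length / 2)) = odSel xs) := by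
  intro xs
  induction xs with
  | nil => simp [evSel, odSel]
  | cons a t ih =>
    constructor
    · have hlen : ((a :: t).length + 1) / 2 = t.length / 2 + 1 := by
        simp only [List.length_cons]; omega
      rw [hlen, List.range_succ_eq_map, List.filterMap_cons, List.filterMap_map]
      simp only [Nat.mul_zero, List.getElem?_cons_zero, Function.comp_def]
      have : ∀ k : Nat, (a :: t)[2 * (k + 1)]? = t[2 * k + 1]? := by
        intro k
        have h2 : 2 * (k + 1) = (2 * k + 1) + 1 := by omega
        rw [h2, List.getElem?_cons_succ]
      simp only [this, ih.2, evSel]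
    · have hlen : (a :: t).length / 2 = (t.length + 1) / 2 := by
        simp only [List.length_cons]
      rw [hlen]
      have : ∀ k : Nat, (a :: t)[2 * k + 1]? = t[2 * k]? := by
        intro k; rw [List.getElem?_cons_succ]
      simp only [this, ih.1, odSel]

theorem slice?_step_two (xs : List Int) :
    (PySem.List.slice? xs none none 2).getD [] = evSel xs := by
  have hidx : PySem.List.sliceIndices xs.length none none 2 = (0, (xs.length : Int), 2) := by
    simp [PySem.List.sliceIndices]
  rw [PySem.List.slice?]
  simp only [hidx]
  have hcnt : (if (0 : Int) < 2 then if (0 : Int) < (xs.length : Int) then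
      (((xs.length : Int) - 0 + 2 - 1) / 2).toNat else 0
      else if (xs.length : Int) < 0 then (((0 : Int) - xs.length + -2 - 1) / -2).toNat else 0)
      = (xs.length + 1) / 2 := by
    split_ifs <;> omega
  have hfun : ∀ k : Nat, xs[((0 : Int) + 2 * (k : Int)).toNat]? = xs[2 * k]? := by
    intro k
    have h2 : ((0 : Int) + 2 * (k : Int)).toNat = 2 * k := by omega
    rw [h2]
  simp only [hcnt, hfun, (filterMap_even xs).1, if_neg (by norm_num : ¬ (2 : Int) = 0),
    Option.getD_some]

-- the qualifying-index list of B, relative to start 0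
def qIdx : List Int → List Int
  | [] => []
  | v :: t => if 1 ≤ v then 0 :: (qIdx t).map (· + 1) else (qIdx t).map (· + 1)

theorem enumerate_filter_map_shift (xs : List Int) : ∀ (s : Int),
    ((PySem.List.enumerate xs s).filter (fun p => 1 ≤ p.2)).map (fun p => p.1)
      = (qIdx xs).map (· + s) := by
  induction xs with
  | nil => intro s; simp [PySem.List.enumerate_nil, qIdx]
  | cons v t ih =>
    intro s
    rw [PySem.List.enumerate_cons]
    by_cases h : (1 : Int) ≤ v
    · simp [qIdx, h, ih (s + 1), List.map_map, Function.comp_def]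
      intro a _; omega
    · simp [qIdx, h, ih (s + 1), List.map_map, Function.comp_def]
      intro a _; omega

theorem qIdx_nonneg : ∀ (xs : List Int), ∀ i ∈ qIdx xs, 0 ≤ i := by
  intro xs
  induction xs with
  | nil => simp [qIdx]
  | cons v t ih =>
    intro i hi
    simp only [qIdx] at hi
    split_ifs at hi with h
    · rcases List.mem_cons.mp hi with h0 | hm
      · omega
      · rcases List.mem_map.mp hm with ⟨j, hj, rfl⟩
        have := ih j hj; omega
    · rcases List.mem_map.mp hi with ⟨j, hj, rfl⟩
      have := ih j hj; omega

theorem mem_evSel_odSel : ∀ (l : List Int), (∀ x ∈ evSel l, x ∈ l) ∧ (∀ x ∈ odSel l, x ∈ l) := by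
  intro l
  induction l with
  | nil => simp [evSel, odSel]
  | cons a t ih =>
    constructor
    · intro x hx
      rcases List.mem_cons.mp hx with rfl | hm
      · exact List.mem_cons_self
      · exact List.mem_cons_of_mem _ (ih.2 x hm)
    · intro x hx
      exact List.mem_cons_of_mem _ (ih.1 x hx)

def applyMarks (l : List Int) (sel : List Int) : List Int :=
  sel.foldl (fun acc i => PySem.List.pySetD acc i (-1)) l

theorem applyMarks_nil (l : List Int) : applyMarks l [] = l := rfl

theorem applyMarks_shift : ∀ (js : List Int) (v : Int) (t : List Int),
    (∀ i ∈ js, 0 ≤ i) →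
    applyMarks (v :: t) (js.map (· + 1)) = v :: applyMarks t js := by
  intro js
  induction js with
  | nil => intro v t _; rfl
  | cons j r ih =>
    intro v t hnn
    have hj : 0 ≤ j := hnn j List.mem_cons_self
    have hstep : PySem.List.pySetD (v :: t) (j + 1) (-1) = v :: PySem.List.pySetD t j (-1) := by
      rw [PySem.List.pySetD_of_nonneg _ _ (by omega), PySem.List.pySetD_of_nonneg _ _ hj]
      have : (j + 1).toNat = j.toNat + 1 := by omega
      rw [this, List.set_cons_succ]
    simp only [List.map_cons, applyMarks, List.foldl_cons, hstep]
    exact ih v (PySem.List.pySetD t j (-1)) (fun i hi => hnn i (List.mem_cons_of_mem _ hi))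

-- B's flag-free shape: gB l true marks the next qualifying element
def gB : List Int → Bool → List Int
  | [], _ => []
  | v :: t, mark =>
    if 1 ≤ v then (if mark then (-1) else v) :: gB t (!mark)
    else v :: gB t mark

theorem applyMarks_qIdx : ∀ (xs : List Int),
    applyMarks xs (evSel (qIdx xs)) = gB xs true ∧
    applyMarks xs (odSel (qIdx xs)) = gB xs false := by
  intro xs
  induction xs with
  | nil => simp [qIdx, evSel, odSel, applyMarks_nil, gB]
  | cons v t ih =>
    have hnnEv : ∀ i ∈ evSel (qIdx t), 0 ≤ i :=
      fun i hi => qIdx_nonneg t i ((mem_evSel_odSel (qIdx t)).1 i hi)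
    have hnnOd : ∀ i ∈ odSel (qIdx t), 0 ≤ i :=
      fun i hi => qIdx_nonneg t i ((mem_evSel_odSel (qIdx t)).2 i hi)
    by_cases h : (1 : Int) ≤ v
    · constructor
      · simp only [qIdx, if_pos h, evSel, (evSel_map_add_one (qIdx t)).2]
        show applyMarks (v :: t) (0 :: (odSel (qIdx t)).map (· + 1)) = gB (v :: t) true
        have h0 : PySem.List.pySetD (v :: t) 0 (-1) = (-1) :: t := by
          rw [PySem.List.pySetD_of_nonneg _ _ (by omega)]; rfl
        simp only [applyMarks, List.foldl_cons, h0]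
        have := applyMarks_shift (odSel (qIdx t)) (-1) t hnnOd
        simp only [applyMarks] at this
        rw [this]
        have ih2 := ih.2
        simp only [applyMarks] at ih2
        simp [gB, h, ih2]
      · simp only [qIdx, if_pos h, odSel, (evSel_map_add_one (qIdx t)).1]
        rw [applyMarks_shift _ _ _ hnnEv]
        simp [gB, h, ih.1]
    · constructor
      · simp only [qIdx, if_neg h, (evSel_map_add_one (qIdx t)).1]
        rw [applyMarks_shift _ _ _ hnnEv]
        simp [gB, h, ih.1]
      · simp only [qIdx, if_neg h, (evSel_map_add_one (qIdx t)).2]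
        rw [applyMarks_shift _ _ _ hnnOd]
        simp [gB, h, ih.2]

theorem isOdd_succ (flag : Int) : isOddNumber (flag + 1) = !isOddNumber flag := by
  simp only [isOddNumber, PySem.Int.mod]
  have hf : ∀ a : Int, a.fmod 2 = a % 2 := fun a => by rw [Int.fmod_eq_emod]; omega
  simp only [hf]
  rcases Int.emod_two_eq flag with h | h
  · have h1 : (flag + 1) % 2 = 1 := by omega
    simp [h, h1]
  · have h1 : (flag + 1) % 2 = 0 := by omega
    simp [h, h1]

theorem assignLoopA_eq_gB : ∀ (xs : List Int) (flag : Int),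
    assignLoopA xs flag = gB xs (isOddNumber flag) := by
  intro xs
  induction xs with
  | nil => intro flag; rfl
  | cons v t ih =>
    intro flag
    by_cases h : v < 1
    · simp [assignLoopA, gB, h, ih, show ¬ (1 : Int) ≤ v by omega]
    · simp [assignLoopA, gB, h, ih, isOdd_succ, show (1 : Int) ≤ v by omega]
      by_cases hodd : isOddNumber flag = true <;> simp [hodd]

theorem alt_eq_gB (xs : List Int) : AssignTaskListToAssistant_alt xs = gB xs true := by
  rw [AssignTaskListToAssistant_alt]
  simp only [enumerate_filter_map_shift xs 0, slice?_step_two]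
  have hmap : (qIdx xs).map (· + 0) = qIdx xs := by
    simp
  rw [hmap]
  exact (applyMarks_qIdx xs).1

-- ===== VERDICT (by name: the statement is the Claim_ definition above) =====
theorem AssignTaskListToAssistant_spec : Claim_equal_AssignTaskListToAssistant := by
  intro xs _
  show AssignTaskListToAssistant xs = AssignTaskListToAssistant_alt xs
  rw [AssignTaskListToAssistant, assignLoopA_eq_gB, alt_eq_gB]
  rfl
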